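-- pv_equiv track=rewrite | github.com/babaorain/EMG | emg_muscle_selector_app.py | to_graphviz_path
-- ===== SOURCE A (Python) =====
-- LEVEL_ORDER = ["Roots", "Trunk", "Division", "Cord", "Plexus", "Nerve", "Muscle"]
--
-- BRACHIAL_MAP = {
--     "C5": {"level": "Roots"}, "C6": {"level": "Roots"}, "C7": {"level": "Roots"},
--     "C8": {"level": "Roots"}, "T1": {"level": "Roots"},
--     "Upper trunk": {"level": "Trunk"}, "Middle trunk": {"level": "Trunk"}, "Lower trunk": {"level": "Trunk"},
--     "Anterior division (upper)": {"level": "Division"},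
--     "Anterior division (middle)": {"level": "Division"},
--     "Anterior division (lower)": {"level": "Division"},
--     "Posterior divisions (all)": {"level": "Division"},
--     "Lateral cord": {"level": "Cord"},
--     "Medial cord": {"level": "Cord"},
--     "Posterior cord": {"level": "Cord"},
--     # Named branches / major nerves:
--     "Dorsal scapular nerve": {"level": "Nerve"},
--     "Long thoracic nerve": {"level": "Nerve"},
--     "Suprascapular nerve": {"level": "Nerve"},
--     "Lateral pectoral nerve": {"level": "Nerve"},
--     "Medial pectoral nerve": {"level": "Nerve"},
--     "Thoracodorsal nerve": {"level": "Nerve"},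
--     "Upper subscapular nerve": {"level": "Nerve"},
--     "Lower subscapular nerve": {"level": "Nerve"},
--     "Musculocutaneous nerve": {"level": "Nerve"},
--     "Axillary nerve": {"level": "Nerve"},
--     "Radial nerve": {"level": "Nerve"},
--     "Median nerve": {"level": "Nerve"},
--     "Ulnar nerve": {"level": "Nerve"},
-- }
--
-- LUMBOSACRAL_MAP = {
--     "L2": {"level": "Roots"}, "L3": {"level": "Roots"}, "L4": {"level": "Roots"},
--     "L5": {"level": "Roots"}, "S1": {"level": "Roots"}, "S2": {"level": "Roots"}, "S3": {"level": "Roots"},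
--     "Lumbar plexus": {"level": "Plexus"},
--     "Sacral plexus": {"level": "Plexus"},
--     "Lumbosacral trunk (L4-L5)": {"level": "Plexus"},
--     "Femoral nerve": {"level": "Nerve"},
--     "Obturator nerve": {"level": "Nerve"},
--     "Lateral femoral cutaneous nerve": {"level": "Nerve"},
--     "Sciatic nerve": {"level": "Nerve"},
--     "Tibial nerve": {"level": "Nerve"},
--     "Common peroneal nerve": {"level": "Nerve"},
--     "Deep peroneal nerve": {"level": "Nerve"},
--     "Superficial peroneal nerve": {"level": "Nerve"},
-- }
--
-- def to_graphviz_path(path_nodes, region="Upper"):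
--     # 選擇節點庫
--     node_map = BRACHIAL_MAP if region == "Upper" else LUMBOSACRAL_MAP
--     # 按 level 分組
--     grouped = {lvl: [] for lvl in LEVEL_ORDER}
--     for node in path_nodes:
--         lvl = node_map.get(node, {}).get("level")
--         # 允許「Medial cord / Lateral cord」這類混合字串
--         if lvl is None:
--             # 嘗試臨時猜層級
--             if "cord" in node.lower():
--                 lvl = "Cord"
--             elif "trunk" in node.lower():
--                 lvl = "Trunk"
--             elif "division" in node.lower():
--                 lvl = "Division"
--             elif "plexus" in node.lower():
--                 lvl = "Plexus"
--             elif "nerve" in node.lower():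
--                 lvl = "Nerve"
--             else:
--                 lvl = "Roots"
--         grouped[lvl].append(node)
--
--     # 建 DOT 圖
--     dot = ['digraph G {rankdir=LR; node [shape=box, fontsize=12]; splines=true; overlap=false; ranksep=0.6;}']
--     # 同層橫向排列
--     for lvl in LEVEL_ORDER:
--         if grouped[lvl]:
--             sub = ['{rank=same;']
--             for n in grouped[lvl]:
--                 safe = n.replace('"', '')
--                 sub.append(f'"{safe}";')
--             sub.append('}')
--             dot.append(' '.join(sub))
--
--     # 依 path 順序連線
--     for i in range(len(path_nodes)-1):
--         a = path_nodes[i].replace('"', '')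
--         b = path_nodes[i+1].replace('"', '')
--         dot.append(f'"{a}" -> "{b}" [penwidth=2];')
--
--     return "\n".join(dot)
-- ===== SOURCE B (Python) =====
-- LEVEL_ORDER = ["Roots", "Trunk", "Division", "Cord", "Plexus", "Nerve", "Muscle"]
--
-- BRACHIAL_MAP = {
--     "C5": {"level": "Roots"}, "C6": {"level": "Roots"}, "C7": {"level": "Roots"},
--     "C8": {"level": "Roots"}, "T1": {"level": "Roots"},
--     "Upper trunk": {"level": "Trunk"}, "Middle trunk": {"level": "Trunk"}, "Lower trunk": {"level": "Trunk"},
--     "Anterior division (upper)": {"level": "Division"},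
--     "Anterior division (middle)": {"level": "Division"},
--     "Anterior division (lower)": {"level": "Division"},
--     "Posterior divisions (all)": {"level": "Division"},
--     "Lateral cord": {"level": "Cord"},
--     "Medial cord": {"level": "Cord"},
--     "Posterior cord": {"level": "Cord"},
--     "Dorsal scapular nerve": {"level": "Nerve"},
--     "Long thoracic nerve": {"level": "Nerve"},
--     "Suprascapular nerve": {"level": "Nerve"},
--     "Lateral pectoral nerve": {"level": "Nerve"},
--     "Medial pectoral nerve": {"level": "Nerve"},
--     "Thoracodorsal nerve": {"level": "Nerve"},
--     "Upper subscapular nerve": {"level": "Nerve"},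
--     "Lower subscapular nerve": {"level": "Nerve"},
--     "Musculocutaneous nerve": {"level": "Nerve"},
--     "Axillary nerve": {"level": "Nerve"},
--     "Radial nerve": {"level": "Nerve"},
--     "Median nerve": {"level": "Nerve"},
--     "Ulnar nerve": {"level": "Nerve"},
-- }
--
-- LUMBOSACRAL_MAP = {
--     "L2": {"level": "Roots"}, "L3": {"level": "Roots"}, "L4": {"level": "Roots"},
--     "L5": {"level": "Roots"}, "S1": {"level": "Roots"}, "S2": {"level": "Roots"}, "S3": {"level": "Roots"},
--     "Lumbar plexus": {"level": "Plexus"},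
--     "Sacral plexus": {"level": "Plexus"},
--     "Lumbosacral trunk (L4-L5)": {"level": "Plexus"},
--     "Femoral nerve": {"level": "Nerve"},
--     "Obturator nerve": {"level": "Nerve"},
--     "Lateral femoral cutaneous nerve": {"level": "Nerve"},
--     "Sciatic nerve": {"level": "Nerve"},
--     "Tibial nerve": {"level": "Nerve"},
--     "Common peroneal nerve": {"level": "Nerve"},
--     "Deep peroneal nerve": {"level": "Nerve"},
--     "Superficial peroneal nerve": {"level": "Nerve"},
-- }
--
-- _FALLBACK = [("cord", "Cord"), ("trunk", "Trunk"), ("division", "Division"),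
--              ("plexus", "Plexus"), ("nerve", "Nerve")]
--
--
-- def _classify(node_map, node):
--     """Level of a node: map lookup, then the substring fallback table, else Roots."""
--     lvl = node_map.get(node, {}).get("level")
--     if lvl is not None:
--         return lvl
--     low = node.lower()
--     for sub, lv in _FALLBACK:
--         if sub in low:
--             return lv
--     return "Roots"
--
--
-- def to_graphviz_path(path_nodes, region="Upper"):
--     node_map = BRACHIAL_MAP if region == "Upper" else LUMBOSACRAL_MAP
--     lines = ['digraph G {rankdir=LR; node [shape=box, fontsize=12]; splines=true; overlap=false; ranksep=0.6;}']
--     # one re-scan of path_nodes per level instead of a precomputed grouped dict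
--     for lvl in LEVEL_ORDER:
--         members = [n for n in path_nodes if _classify(node_map, n) == lvl]
--         if members:
--             lines.append(' '.join(['{rank=same;'] + [f'"{n.replace(chr(34), "")}";' for n in members] + ['}']))
--     # edges from consecutive pairs instead of an index loop
--     lines.extend(f'"{a.replace(chr(34), "")}" -> "{b.replace(chr(34), "")}" [penwidth=2];'
--                  for a, b in zip(path_nodes, path_nodes[1:]))
--     return "\n".join(lines)
-- ===== Notes on version B (the rewrite author's own statement) =====
-- stated objective: simpler
-- what changed: B drops A's precomputed grouped dict and emits each {rank=same} block by filtering path_nodes per level with a pure classify helper, and builds edge lines from zip(path_nodes, path_nodes[1:]) instead of an index loop over range(len-1).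
import Mathlib
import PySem

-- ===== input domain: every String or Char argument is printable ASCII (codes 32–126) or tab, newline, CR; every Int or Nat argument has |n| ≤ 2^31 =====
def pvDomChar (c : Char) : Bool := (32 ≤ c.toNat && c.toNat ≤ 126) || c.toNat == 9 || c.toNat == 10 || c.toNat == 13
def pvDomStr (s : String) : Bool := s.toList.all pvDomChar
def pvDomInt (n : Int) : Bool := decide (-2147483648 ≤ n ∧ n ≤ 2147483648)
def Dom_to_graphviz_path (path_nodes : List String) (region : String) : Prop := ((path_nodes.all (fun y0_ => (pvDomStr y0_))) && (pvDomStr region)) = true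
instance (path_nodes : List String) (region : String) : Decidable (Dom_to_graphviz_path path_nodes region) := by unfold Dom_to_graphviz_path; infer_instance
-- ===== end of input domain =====

-- B re-emits the {rank=same;...} blocks by one filter pass of path_nodes per level (no precomputed
-- grouped dict) and builds the edges from zipped consecutive pairs instead of an index loop;
-- objective: simpler. Same return value; neither version mutates its arguments.

-- module constants shared by both programs
def pvLevelOrder : List String := ["Roots", "Trunk", "Division", "Cord", "Plexus", "Nerve", "Muscle"]

def pvLvl (s : String) : PySem.Dict String String := PySem.Dict.ofList [("level", s)]

def pvBrachial : PySem.Dict String (PySem.Dict String String) := PySem.Dict.ofList [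
  ("C5", pvLvl "Roots"), ("C6", pvLvl "Roots"), ("C7", pvLvl "Roots"),
  ("C8", pvLvl "Roots"), ("T1", pvLvl "Roots"),
  ("Upper trunk", pvLvl "Trunk"), ("Middle trunk", pvLvl "Trunk"), ("Lower trunk", pvLvl "Trunk"),
  ("Anterior division (upper)", pvLvl "Division"),
  ("Anterior division (middle)", pvLvl "Division"),
  ("Anterior division (lower)", pvLvl "Division"),
  ("Posterior divisions (all)", pvLvl "Division"),
  ("Lateral cord", pvLvl "Cord"),
  ("Medial cord", pvLvl "Cord"),
  ("Posterior cord", pvLvl "Cord"),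
  ("Dorsal scapular nerve", pvLvl "Nerve"),
  ("Long thoracic nerve", pvLvl "Nerve"),
  ("Suprascapular nerve", pvLvl "Nerve"),
  ("Lateral pectoral nerve", pvLvl "Nerve"),
  ("Medial pectoral nerve", pvLvl "Nerve"),
  ("Thoracodorsal nerve", pvLvl "Nerve"),
  ("Upper subscapular nerve", pvLvl "Nerve"),
  ("Lower subscapular nerve", pvLvl "Nerve"),
  ("Musculocutaneous nerve", pvLvl "Nerve"),
  ("Axillary nerve", pvLvl "Nerve"),
  ("Radial nerve", pvLvl "Nerve"),
  ("Median nerve", pvLvl "Nerve"),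
  ("Ulnar nerve", pvLvl "Nerve")]

def pvLumbosacral : PySem.Dict String (PySem.Dict String String) := PySem.Dict.ofList [
  ("L2", pvLvl "Roots"), ("L3", pvLvl "Roots"), ("L4", pvLvl "Roots"),
  ("L5", pvLvl "Roots"), ("S1", pvLvl "Roots"), ("S2", pvLvl "Roots"), ("S3", pvLvl "Roots"),
  ("Lumbar plexus", pvLvl "Plexus"),
  ("Sacral plexus", pvLvl "Plexus"),
  ("Lumbosacral trunk (L4-L5)", pvLvl "Plexus"),
  ("Femoral nerve", pvLvl "Nerve"),
  ("Obturator nerve", pvLvl "Nerve"),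
  ("Lateral femoral cutaneous nerve", pvLvl "Nerve"),
  ("Sciatic nerve", pvLvl "Nerve"),
  ("Tibial nerve", pvLvl "Nerve"),
  ("Common peroneal nerve", pvLvl "Nerve"),
  ("Deep peroneal nerve", pvLvl "Nerve"),
  ("Superficial peroneal nerve", pvLvl "Nerve")]

def pvHeader : String := "digraph G {rankdir=LR; node [shape=box, fontsize=12]; splines=true; overlap=false; ranksep=0.6;}"

-- ===== PORT A =====
def to_graphviz_path (path_nodes : List String) (region : String) : String :=
  let node_map := if region == "Upper" then pvBrachial else pvLumbosacral
  let grouped : PySem.Dict String (List String) :=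
    pvLevelOrder.foldl (fun d lvl => d.insert lvl ([] : List String)) PySem.Dict.empty
  let grouped := path_nodes.foldl (fun d node =>
    let lvl :=
      match (node_map.getD node PySem.Dict.empty).get? "level" with
      | some l => l
      | none =>
        if PySem.Str.isIn "cord" (PySem.Str.lower node) then "Cord"
        else if PySem.Str.isIn "trunk" (PySem.Str.lower node) then "Trunk"
        else if PySem.Str.isIn "division" (PySem.Str.lower node) then "Division"
        else if PySem.Str.isIn "plexus" (PySem.Str.lower node) then "Plexus"
        else if PySem.Str.isIn "nerve" (PySem.Str.lower node) then "Nerve"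
        else "Roots"
    d.modify lvl [] (fun xs => xs ++ [node])) grouped
  let dot : List String := [pvHeader]
  let dot := pvLevelOrder.foldl (fun acc lvl =>
    if (grouped.getD lvl []) ≠ ([] : List String) then
      let sub := (grouped.getD lvl []).foldl
        (fun s n => s ++ ["\"" ++ PySem.Str.replace n "\"" "" ++ "\";"]) ["{rank=same;"]
      let sub := sub ++ ["}"]
      acc ++ [PySem.Str.join " " sub]
    else acc) dot
  let dot := (PySem.List.pyRange 0 ((path_nodes.length : Int) - 1) 1).foldl (fun acc i =>
    let a := PySem.Str.replace (PySem.List.pyGetD path_nodes i "") "\"" ""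
    let b := PySem.Str.replace (PySem.List.pyGetD path_nodes (i + 1) "") "\"" ""
    acc ++ ["\"" ++ a ++ "\" -> \"" ++ b ++ "\" [penwidth=2];"]) dot
  PySem.Str.join "\n" dot

-- ===== PORT B =====
def pvFallback : List (String × String) :=
  [("cord", "Cord"), ("trunk", "Trunk"), ("division", "Division"),
   ("plexus", "Plexus"), ("nerve", "Nerve")]

def pvClassifyGo (low : String) : List (String × String) → String
  | [] => "Roots"
  | (sub, lv) :: rest => if PySem.Str.isIn sub low then lv else pvClassifyGo low rest

def pvClassify (node_map : PySem.Dict String (PySem.Dict String String)) (node : String) : String :=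
  match (node_map.getD node PySem.Dict.empty).get? "level" with
  | some l => l
  | none => pvClassifyGo (PySem.Str.lower node) pvFallback

def to_graphviz_path_alt (path_nodes : List String) (region : String) : String :=
  let node_map := if region == "Upper" then pvBrachial else pvLumbosacral
  let lines : List String := [pvHeader]
  let lines := pvLevelOrder.foldl (fun acc lvl =>
    let members := path_nodes.filter (fun n => pvClassify node_map n == lvl)
    if members ≠ ([] : List String) then
      acc ++ [PySem.Str.join " "
        (["{rank=same;"] ++ members.map (fun n => "\"" ++ PySem.Str.replace n "\"" "" ++ "\";") ++ ["}"])]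
    else acc) lines
  let lines := lines ++ (path_nodes.zip (path_nodes.drop 1)).map (fun p =>
    "\"" ++ PySem.Str.replace p.1 "\"" "" ++ "\" -> \"" ++ PySem.Str.replace p.2 "\"" "" ++ "\" [penwidth=2];")
  PySem.Str.join "\n" lines

-- ===== PRECONDITION & SPEC =====
def Spec_to_graphviz_path (path_nodes : List String) (region : String) (out : String) : Prop := out = to_graphviz_path_alt path_nodes region
instance (path_nodes : List String) (region : String) (out : String) : Decidable (Spec_to_graphviz_path path_nodes region out) := by unfold Spec_to_graphviz_path; infer_instance

-- ===== CLAIM (what is proved, stated in full; the proofs are below) =====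
def Claim_equal_to_graphviz_path : Prop := ∀ (path_nodes : List String) (region : String), Dom_to_graphviz_path path_nodes region → Spec_to_graphviz_path path_nodes region (to_graphviz_path path_nodes region)

-- ===== LEMMAS AND PROOFS =====

-- A's inline level computation is pvClassify
theorem classify_eq (m : PySem.Dict String (PySem.Dict String String)) (n : String) :
    (match (m.getD n PySem.Dict.empty).get? "level" with
      | some l => l
      | none =>
        if PySem.Str.isIn "cord" (PySem.Str.lower n) then "Cord"
        else if PySem.Str.isIn "trunk" (PySem.Str.lower n) then "Trunk"
        else if PySem.Str.isIn "division" (PySem.Str.lower n) then "Division"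
        else if PySem.Str.isIn "plexus" (PySem.Str.lower n) then "Plexus"
        else if PySem.Str.isIn "nerve" (PySem.Str.lower n) then "Nerve"
        else "Roots") = pvClassify m n := by
  simp [pvClassify, pvFallback, pvClassifyGo]

-- the initial all-empty dict yields [] for every key
theorem init_getD (c : String) :
    ((pvLevelOrder.foldl (fun d lvl => d.insert lvl ([] : List String)) PySem.Dict.empty).getD c []) = [] := by
  simp [pvLevelOrder, PySem.Dict.getD_insert]

-- the grouping loop keyed by pvClassify is a per-level filter
theorem grouped_getD (m : PySem.Dict String (PySem.Dict String String))
    (xs : List String) (d : PySem.Dict String (List String)) (c : String) :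
    ((xs.foldl (fun d node => d.modify (pvClassify m node) [] (fun l => l ++ [node])) d).getD c [])
      = d.getD c [] ++ xs.filter (fun n => pvClassify m n == c) := by
  induction xs generalizing d with
  | nil => simp
  | cons x t ih =>
    simp only [List.foldl_cons, List.filter_cons, ih]
    rw [PySem.Dict.getD_modify]
    by_cases h : pvClassify m x = c
    · simp [h]
    · simp [h, Ne.symm h]

-- Python indexing facts for the edge loops
theorem pyGetD_cons_succ (x y : String) (t' : List String) (i : Int) (hi : 0 ≤ i) :
    PySem.List.pyGetD (x :: y :: t') (i + 1) "" = PySem.List.pyGetD (y :: t') i "" := by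
  have h1 : (0:Int) ≤ i + 1 := by omega
  simp only [PySem.List.pyGetD, PySem.List.pyGet?, PySem.List.pyIdx?, List.length_cons,
    Nat.cast_add, Nat.cast_one, hi, h1, if_true]
  by_cases h : i < (t'.length : Int) + 1
  · rw [if_pos (by omega), if_pos h]
    simp only [Int.toNat_add hi (by norm_num : (0:Int) ≤ 1), Int.toNat_one, Option.bind_some]
    simp
  · rw [if_neg (by omega), if_neg h]
    rfl

theorem pyGetD_cons_zero (x : String) (t : List String) :
    PySem.List.pyGetD (x :: t) (0 : Int) "" = x := by
  simp [PySem.List.pyGetD, PySem.List.pyGet?, PySem.List.pyIdx?]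

theorem edges_go (g : String → String → String) (t : List String) : ∀ x : String,
    ((List.range t.length).map (fun j : Nat =>
        g (PySem.List.pyGetD (x :: t) (Int.ofNat j) "") (PySem.List.pyGetD (x :: t) (Int.ofNat j + 1) "")))
      = ((x :: t).zip t).map (fun p => g p.1 p.2) := by
  induction t with
  | nil => intro x; rfl
  | cons y t' ih =>
    intro x
    rw [List.length_cons, List.range_succ_eq_map]
    simp only [List.map_cons, List.map_map, List.zip_cons_cons]
    have h0 : Int.ofNat 0 = (0 : Int) := rfl
    rw [h0]
    rw [pyGetD_cons_zero, pyGetD_cons_succ x y t' 0 le_rfl, pyGetD_cons_zero]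
    congr 1
    rw [← ih y]
    apply List.map_congr_left
    intro j _
    have hs : Int.ofNat (Nat.succ j) = Int.ofNat j + 1 := rfl
    simp only [Function.comp, hs]
    rw [pyGetD_cons_succ x y t' (Int.ofNat j) (Int.natCast_nonneg j),
        pyGetD_cons_succ x y t' (Int.ofNat j + 1) (add_nonneg (Int.natCast_nonneg j) (by norm_num))]

-- edge lines: A's index loop over range(len-1) = B's map over zipped consecutive pairs
theorem edges_eq (g : String → String → String) (xs : List String) :
    ((PySem.List.pyRange 0 ((xs.length : Int) - 1) 1).map (fun i =>
        g (PySem.List.pyGetD xs i "") (PySem.List.pyGetD xs (i + 1) "")))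
      = (xs.zip (xs.drop 1)).map (fun p => g p.1 p.2) := by
  cases xs with
  | nil => rfl
  | cons x t =>
    have hl : ((x :: t).length : Int) - 1 = (t.length : Int) := by
      simp
    rw [hl, PySem.List.pyRange_zero_natCast, List.map_map]
    exact edges_go g t x

-- ===== VERDICT (by name: the statement is the Claim_ definition above) =====
theorem to_graphviz_path_spec : Claim_equal_to_graphviz_path := by
  intro path_nodes region _
  unfold Spec_to_graphviz_path to_graphviz_path to_graphviz_path_alt
  simp only [classify_eq, PySem.List.foldl_append_singleton_eq_map, grouped_getD, init_getD,
    List.nil_append]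
  rw [edges_eq (fun a b => "\"" ++ PySem.Str.replace a "\"" "" ++ "\" -> \"" ++
        PySem.Str.replace b "\"" "" ++ "\" [penwidth=2];") path_nodes]
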